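-- pv_equiv track=rewrite | github.com/manikshakya/PythonExamSolution | setbacks.py | setbacks
-- ===== SOURCE A (Python) =====
-- def setbacks(lifts):
--     counter = 0
--     backs = []
--     for i in lifts:
--         if counter < i:
--             counter = i
--         else:
--             backs.append(i)
--
--     return backs
-- ===== SOURCE B (Python) =====
-- def setbacks(lifts):
--     lifts = list(lifts)
--     # stateless: an element is a setback iff it does not exceed the maximum
--     # of everything strictly before it (with 0 when nothing precedes it)
--     return [x for j, x in enumerate(lifts) if x <= max([0] + lifts[:j])]
-- ===== Notes on version B (the rewrite author's own statement) =====
-- stated objective: alternative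
-- what changed: Replaces A's single-pass running-max accumulator with a stateless brute-force formulation: for each position, recompute the maximum of the strict prefix (seeded with 0) from scratch with a slice and max(), and keep the element iff it does not exceed it - no loop state carried at all.
import Mathlib
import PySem

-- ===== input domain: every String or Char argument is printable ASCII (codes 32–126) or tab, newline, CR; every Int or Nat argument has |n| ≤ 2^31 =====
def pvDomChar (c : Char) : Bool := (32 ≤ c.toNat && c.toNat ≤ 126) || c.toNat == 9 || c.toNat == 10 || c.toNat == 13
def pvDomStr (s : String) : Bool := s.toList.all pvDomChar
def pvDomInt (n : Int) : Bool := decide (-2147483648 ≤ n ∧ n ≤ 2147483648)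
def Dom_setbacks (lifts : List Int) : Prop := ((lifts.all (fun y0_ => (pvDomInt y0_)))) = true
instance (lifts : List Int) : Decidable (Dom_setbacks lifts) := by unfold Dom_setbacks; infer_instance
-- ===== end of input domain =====

-- B replaces A's single-pass running-max accumulator with a stateless brute-force
-- formulation (per element, recompute the max of its strict prefix, seeded with 0,
-- and keep it iff it does not exceed that max); alternative decomposition, no speed claim.

-- ===== PORT A =====
-- state = (counter, backs); for i in lifts: if counter < i: counter = i else backs.append(i)
def setbacks (lifts : List Int) : List Int :=
  (lifts.foldl (fun (st : Int × List Int) i =>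
    if st.1 < i then (i, st.2) else (st.1, st.2 ++ [i])) (0, [])).2

-- ===== PORT B =====
-- [x for j, x in enumerate(lifts) if x <= max([0] + lifts[:j])];
-- Python's max of the nonempty list [0] + lifts[:j] is the fold of max over it
-- from its head 0, written here as foldl max 0 over the 0-headed list.
def setbacks_alt (lifts : List Int) : List Int :=
  (PySem.List.enumerate lifts 0).filterMap (fun jx =>
    if jx.2 ≤ (((0 : Int) :: PySem.List.slice lifts none (some jx.1)).foldl max 0)
    then some jx.2 else none)

-- ===== PRECONDITION & SPEC =====
def Spec_setbacks (lifts : List Int) (out : List Int) : Prop := out = setbacks_alt lifts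
instance (lifts : List Int) (out : List Int) : Decidable (Spec_setbacks lifts out) := by unfold Spec_setbacks; infer_instance

-- ===== CLAIM (what is proved, stated in full; the proofs are below) =====
def Claim_equal_setbacks : Prop := ∀ (lifts : List Int), Dom_setbacks lifts → Spec_setbacks lifts (setbacks lifts)

-- ===== LEMMAS AND PROOFS =====

-- reference recursion: the "kept" elements starting from running max c
def pvGo (c : Int) : List Int → List Int
  | [] => []
  | x :: xs => if c < x then pvGo x xs else x :: pvGo c xs

theorem pvA_loop (l : List Int) : ∀ (c : Int) (acc : List Int),
    (l.foldl (fun (st : Int × List Int) i =>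
      if st.1 < i then (i, st.2) else (st.1, st.2 ++ [i])) (c, acc)).2 = acc ++ pvGo c l := by
  induction l with
  | nil => intro c acc; simp [pvGo]
  | cons x xs ih =>
    intro c acc
    by_cases h : c < x <;> simp [List.foldl, pvGo, h, ih]

theorem pvB_go (l : List Int) : ∀ (xs pre : List Int), pre ++ xs = l →
    (PySem.List.enumerate xs (pre.length : Int)).filterMap (fun jx =>
        if jx.2 ≤ (((0 : Int) :: PySem.List.slice l none (some jx.1)).foldl max 0)
        then some jx.2 else none)
      = pvGo (pre.foldl max 0) xs := by
  intro xs
  induction xs with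
  | nil => intro pre _; simp [PySem.List.enumerate_nil, pvGo]
  | cons x xs ih =>
    intro pre hl
    rw [PySem.List.enumerate_cons, List.filterMap_cons]
    have hslice : PySem.List.slice l none (some ((pre.length : Nat) : Int)) = pre := by
      rw [PySem.List.slice_to_natCast, ← hl, List.take_left]
    have hc : ((0 : Int) :: pre).foldl max 0 = pre.foldl max 0 := by simp
    have htail := ih (pre ++ [x]) (by simpa using hl)
    have hlen : (((pre ++ [x]).length : Nat) : Int) = (pre.length : Int) + 1 := by
      simp
    rw [hlen] at htail
    have hmax : (pre ++ [x]).foldl max 0 = max (pre.foldl max 0) x := by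
      simp [List.foldl_append]
    rw [hmax] at htail
    by_cases h : pre.foldl max 0 < x
    · have hx : ¬ x ≤ ((0 : Int) :: PySem.List.slice l none (some (pre.length : Int))).foldl max 0 := by
        rw [hslice, hc]; omega
      have hm : max (pre.foldl max 0) x = x := by omega
      simp only [hx, reduceIte, pvGo, if_pos h]
      rw [htail, hm]
    · have hx : x ≤ ((0 : Int) :: PySem.List.slice l none (some (pre.length : Int))).foldl max 0 := by
        rw [hslice, hc]; omega
      have hm : max (pre.foldl max 0) x = pre.foldl max 0 := by omega
      simp only [hx, reduceIte, pvGo, if_neg h]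
      rw [htail, hm]

-- ===== VERDICT (by name: the statement is the Claim_ definition above) =====
theorem setbacks_spec : Claim_equal_setbacks := by
  intro lifts _
  show setbacks lifts = setbacks_alt lifts
  unfold setbacks setbacks_alt
  rw [pvA_loop]
  have := pvB_go lifts lifts [] (by simp)
  simpa using this.symm
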